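-- pv_equiv track=rewrite | github.com/AHCorn/RMMV-Toolkit | rmmv_event_extractor.py | merge_dialogues
-- ===== SOURCE A (Python) =====
-- def merge_dialogues(dialogues):
--     merged = []
--     current_dialogue = None
--     count = 1
--
--     for dialogue in dialogues:
--         if current_dialogue == dialogue:
--             count += 1
--         else:
--             if current_dialogue is not None:
--                 if count > 1:
--                     merged.append((current_dialogue[0], f"{current_dialogue[1]} +{count}"))
--                 else:
--                     merged.append(current_dialogue)
--             current_dialogue = dialogue
--             count = 1
--
--     if current_dialogue is not None:
--         if count > 1:
--             merged.append((current_dialogue[0], f"{current_dialogue[1]} +{count}"))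
--         else:
--             merged.append(current_dialogue)
--
--     return merged
-- ===== SOURCE B (Python) =====
-- def merge_dialogues(dialogues):
--     n = len(dialogues)
--     # stage 1: indices where a new run of consecutive equal dialogues begins
--     starts = [i for i in range(n) if i == 0 or dialogues[i] != dialogues[i - 1]]
--     # stage 2: each run is a (start, end) slice of consecutive boundaries
--     bounds = starts + [n]
--     merged = []
--     for s, e in zip(bounds, bounds[1:]):
--         spk, txt = dialogues[s]
--         merged.append((spk, txt) if e - s == 1 else (spk, f"{txt} +{e - s}"))
--     return merged
-- ===== Notes on version B (the rewrite author's own statement) =====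
-- stated objective: alternative
-- what changed: Replaces A's single-pass pending-element state machine (current_dialogue/count carried across iterations with flush-on-change plus a trailing flush) by two staged passes: a comprehension first computes the boundary indices where a new run of consecutive equal dialogues starts, then a map over zip(bounds, bounds[1:]) emits each run's merged item from index arithmetic alone.
import Mathlib
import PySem

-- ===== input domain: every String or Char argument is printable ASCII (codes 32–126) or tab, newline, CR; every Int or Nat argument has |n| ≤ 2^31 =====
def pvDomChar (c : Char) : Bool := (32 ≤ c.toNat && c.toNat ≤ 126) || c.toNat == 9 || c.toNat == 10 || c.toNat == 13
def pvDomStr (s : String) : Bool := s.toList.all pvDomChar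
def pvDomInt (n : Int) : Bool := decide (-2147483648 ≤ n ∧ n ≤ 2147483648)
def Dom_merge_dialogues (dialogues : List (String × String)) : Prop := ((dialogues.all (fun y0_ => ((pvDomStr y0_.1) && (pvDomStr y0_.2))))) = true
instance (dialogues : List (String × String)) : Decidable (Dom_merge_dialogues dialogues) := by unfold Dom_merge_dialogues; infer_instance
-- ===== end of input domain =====

-- B replaces A's pending-element state machine by two staged passes over indices:
-- first the list of run-start boundaries, then a map over consecutive boundary pairs (alternative decomposition, same cost).

-- ===== PORT A =====
-- A's loop: state = (merged so far, current_dialogue : Option, count), flush on change and once at the end.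
def mergeLoopA : List (String × String) → List (String × String) → Option (String × String) → Int → List (String × String)
  | [], merged, cur, count =>
    match cur with
    | none => merged
    | some c => merged ++ [if count > 1 then (c.1, c.2 ++ " +" ++ PySem.Int.toStr count) else c]
  | d :: rest, merged, cur, count =>
    if cur == some d then
      mergeLoopA rest merged cur (count + 1)
    else
      match cur with
      | none => mergeLoopA rest merged (some d) 1
      | some c => mergeLoopA rest (merged ++ [if count > 1 then (c.1, c.2 ++ " +" ++ PySem.Int.toStr count) else c]) (some d) 1

def merge_dialogues (dialogues : List (String × String)) : List (String × String) :=
  mergeLoopA dialogues [] none 1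

-- ===== PORT B =====
-- Source B: stage 1 builds `starts` (a range comprehension of the indices where a new run begins),
-- stage 2 maps over zip(bounds, bounds[1:]).  dialogues[s] is always in range in Python (s is a
-- run start), so the lookup never raises; `.getD` supplies an unused default to keep the port total.
def merge_dialogues_alt (dialogues : List (String × String)) : List (String × String) :=
  let n : Int := dialogues.length
  let starts : List Int := (PySem.List.pyRange 0 n 1).filter
    (fun i => i == 0 || !(PySem.List.pyGet? dialogues i == PySem.List.pyGet? dialogues (i - 1)))
  let bounds : List Int := starts ++ [n]
  (bounds.zip bounds.tail).map (fun se =>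
    let d := (PySem.List.pyGet? dialogues se.1).getD ("", "")
    if se.2 - se.1 == 1 then d
    else (d.1, d.2 ++ " +" ++ PySem.Int.toStr (se.2 - se.1)))

-- ===== PRECONDITION & SPEC =====
def Spec_merge_dialogues (dialogues : List (String × String)) (out : List (String × String)) : Prop := out = merge_dialogues_alt dialogues
instance (dialogues : List (String × String)) (out : List (String × String)) : Decidable (Spec_merge_dialogues dialogues out) := by unfold Spec_merge_dialogues; infer_instance

-- ===== CLAIM (what is proved, stated in full; the proofs are below) =====
def Claim_equal_merge_dialogues : Prop := ∀ (dialogues : List (String × String)), Dom_merge_dialogues dialogues → Spec_merge_dialogues dialogues (merge_dialogues dialogues)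

-- ===== LEMMAS AND PROOFS =====

def pvStartsPred (l : List (String × String)) (i : Nat) : Bool :=
  i == 0 || !(l[i]? == l[i-1]?)

def pvStarts (l : List (String × String)) : List Nat :=
  (List.range l.length).filter (pvStartsPred l)

def pvBounds (l : List (String × String)) : List Nat := pvStarts l ++ [l.length]

lemma filter_range_zero (p : Nat → Bool) (k : Nat) (hk : 0 < k) (h0 : p 0 = true)
    (h : ∀ i, 0 < i → i < k → p i = false) : (List.range k).filter p = [0] := by
  induction k with
  | zero => omega
  | succ m ih =>
    rw [List.range_succ, List.filter_append]
    by_cases hm : m = 0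
    · subst hm; simp [h0]
    · rw [ih (by omega) (fun i h1 h2 => h i h1 (by omega))]
      simp [h m (by omega) (by omega)]

lemma starts_append_replicate (d : String × String) (r : List (String × String)) (k : Nat)
    (hk : 0 < k) (hr : ∀ x xs, r = x :: xs → x ≠ d) :
    pvStarts (List.replicate k d ++ r) = 0 :: (pvStarts r).map (k + ·) := by
  have hlen : (List.replicate k d ++ r).length = k + r.length := by simp
  have hget_lt : ∀ i, i < k → (List.replicate k d ++ r)[i]? = some d := by
    intro i hi
    rw [List.getElem?_append_left (by simpa using hi), List.getElem?_replicate, if_pos hi]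
  have hget_ge : ∀ j, (List.replicate k d ++ r)[k + j]? = r[j]? := by
    intro j
    rw [List.getElem?_append_right (by simp)]
    simp
  unfold pvStarts
  rw [hlen, List.range_add, List.filter_append]
  have h1 : (List.range k).filter (pvStartsPred (List.replicate k d ++ r)) = [0] := by
    apply filter_range_zero _ _ hk
    · simp [pvStartsPred]
    · intro i h1 h2
      simp only [pvStartsPred, hget_lt i h2, hget_lt (i-1) (by omega)]
      simp; omega
  have h2 : (List.map (fun x => k + x) (List.range r.length)).filter
      (pvStartsPred (List.replicate k d ++ r))
      = ((List.range r.length).filter (pvStartsPred r)).map (fun x => k + x) := by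
    rw [List.filter_map]
    congr 1
    apply List.filter_congr
    intro j hj
    rw [List.mem_range] at hj
    simp only [Function.comp]
    have hk0 : (k == 0) = false := by simp; omega
    by_cases hj0 : j = 0
    · subst hj0
      cases r with
      | nil => simp at hj
      | cons x xs =>
        have hxd : x ≠ d := hr x xs rfl
        have e1 : (List.replicate k d ++ x :: xs)[k]? = some x := by simp
        have e2 : (List.replicate k d ++ x :: xs)[k - 1]? = some d := hget_lt (k-1) (by omega)
        simp only [pvStartsPred, Nat.add_zero, e1, e2, hk0]
        simp [hxd]
    · have hkj : (k + j == 0) = false := by simp; omega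
      have hjj : (j == 0) = false := by simp [hj0]
      have e1 := hget_ge j
      have e2 : (List.replicate k d ++ r)[k + j - 1]? = r[j-1]? := by
        rw [show k + j - 1 = k + (j - 1) by omega]; exact hget_ge (j-1)
      simp only [pvStartsPred, e1, e2, hkj, hjj]
  rw [h1, h2]
  simp

lemma repl_decomp (d : String × String) (t : List (String × String)) :
    d :: t = List.replicate ((t.takeWhile (· == d)).length + 1) d ++ t.dropWhile (· == d) := by
  have htw : t.takeWhile (· == d) = List.replicate (t.takeWhile (· == d)).length d :=
    List.eq_replicate_of_mem (fun x hx => by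
      have := List.mem_takeWhile_imp hx
      simpa [beq_iff_eq] using this)
  calc d :: t = d :: (t.takeWhile (· == d) ++ t.dropWhile (· == d)) := by
        rw [List.takeWhile_append_dropWhile]
    _ = List.replicate ((t.takeWhile (· == d)).length + 1) d ++ t.dropWhile (· == d) := by
        rw [List.replicate_succ, List.cons_append, ← htw]

lemma drop_head_ne (d : String × String) (t : List (String × String))
    (x : String × String) (xs : List (String × String))
    (hx : t.dropWhile (· == d) = x :: xs) : x ≠ d := by
  have h := List.head?_dropWhile_not (· == d) t
  rw [hx] at h
  simpa [beq_iff_eq] using h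

lemma starts_cons (d : String × String) (t : List (String × String)) :
    pvStarts (d :: t) = 0 :: (pvStarts (t.dropWhile (· == d))).map
      (((t.takeWhile (· == d)).length + 1) + ·) := by
  rw [repl_decomp d t]
  exact starts_append_replicate d _ _ (by omega) (fun x xs hx => drop_head_ne d t x xs hx)

lemma bounds_cons (d : String × String) (t : List (String × String)) :
    pvBounds (d :: t) = 0 :: (pvBounds (t.dropWhile (· == d))).map
      (((t.takeWhile (· == d)).length + 1) + ·) := by
  unfold pvBounds
  rw [starts_cons]
  have hlen : (d :: t).length = ((t.takeWhile (· == d)).length + 1) + (t.dropWhile (· == d)).length := by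
    have := List.takeWhile_append_dropWhile (p := (· == d)) (l := t)
    have h2 : (t.takeWhile (· == d)).length + (t.dropWhile (· == d)).length = t.length := by
      rw [← List.length_append, this]
    simp; omega
  simp [hlen]

lemma bounds_head (r : List (String × String)) :
    pvBounds r = 0 :: (pvBounds r).tail := by
  cases r with
  | nil => rfl
  | cons d t => rw [bounds_cons]; rfl

lemma zip_tail_map_shift {α : Type} (f : Nat → Nat) (bs : List Nat) (g h : Nat × Nat → α)
    (hf : ∀ p : Nat × Nat, g (f p.1, f p.2) = h p) :
    ((bs.map f).zip (bs.map f).tail).map g = (bs.zip bs.tail).map h := by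
  have ht : (bs.map f).tail = bs.tail.map f := by cases bs <;> rfl
  rw [ht, List.zip_map, List.map_map]
  apply List.map_congr_left
  intro p _
  simpa [Prod.map] using hf p

def pvCanon : List (String × String) → List (String × String)
  | [] => []
  | d :: tail =>
    (if (1 + ((tail.takeWhile (· == d)).length : Int)) == 1 then d
     else (d.1, d.2 ++ " +" ++ PySem.Int.toStr (1 + ((tail.takeWhile (· == d)).length : Int))))
      :: pvCanon (tail.dropWhile (· == d))
termination_by l => l.length
decreasing_by
  have := List.length_dropWhile_le (· == d) tail
  simp only [List.length_cons]
  omega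

def pvItem (l : List (String × String)) (p : Nat × Nat) : String × String :=
  if ((p.2 : Int) - (p.1 : Int)) == 1 then l.getD p.1 ("", "")
  else ((l.getD p.1 ("", "")).1, (l.getD p.1 ("", "")).2 ++ " +" ++ PySem.Int.toStr ((p.2 : Int) - (p.1 : Int)))

def pvMergeIdx (l : List (String × String)) : List (String × String) :=
  ((pvBounds l).zip (pvBounds l).tail).map (pvItem l)

lemma map_zip_cons_shift {α : Type} (k : Nat) (bs : List Nat) (hb : bs = 0 :: bs.tail)
    (g h : Nat × Nat → α) (hf : ∀ p : Nat × Nat, g (k + p.1, k + p.2) = h p) :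
    ((0 :: bs.map (k + ·)).zip ((0 :: bs.map (k + ·)).tail)).map g
      = g (0, k) :: (bs.zip bs.tail).map h := by
  have hmain := zip_tail_map_shift (k + ·) bs g h hf
  conv_lhs => rw [hb]
  rw [hb] at hmain
  simp only [List.map_cons, Nat.add_zero, List.tail_cons, List.zip_cons_cons, List.map_cons] at *
  rw [hmain]
  conv_lhs => rw [← hb]

lemma mergeIdx_eq_canon_aux (n : Nat) : ∀ l : List (String × String),
    l.length ≤ n → pvMergeIdx l = pvCanon l := by
  induction n with
  | zero =>
    intro l hl
    have : l = [] := List.eq_nil_of_length_eq_zero (by omega)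
    subst this; simp [pvMergeIdx, pvCanon, pvBounds, pvStarts]
  | succ n ih =>
    intro l hl
    cases l with
    | nil => simp [pvMergeIdx, pvCanon, pvBounds, pvStarts]
    | cons d t =>
      have hk : 0 < (t.takeWhile (· == d)).length + 1 := by omega
      have hrlen : (t.dropWhile (· == d)).length ≤ n := by
        have := List.length_dropWhile_le (· == d) t
        simp at hl; omega
      -- names
      have hshift : ∀ p : Nat × Nat,
          pvItem (d :: t) (((t.takeWhile (· == d)).length + 1) + p.1,
                           ((t.takeWhile (· == d)).length + 1) + p.2)
          = pvItem (t.dropWhile (· == d)) p := by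
        intro p
        have hget : (d :: t).getD (((t.takeWhile (· == d)).length + 1) + p.1) ("", "")
            = (t.dropWhile (· == d)).getD p.1 ("", "") := by
          rw [List.getD_eq_getElem?_getD, List.getD_eq_getElem?_getD, repl_decomp d t,
            List.getElem?_append_right (by simp)]
          simp
        have hcount : (((((t.takeWhile (· == d)).length + 1) + p.2 : Nat)) : Int)
            - ((((t.takeWhile (· == d)).length + 1) + p.1 : Nat) : Int)
            = ((p.2 : Int) - (p.1 : Int)) := by push_cast; ring
        simp only [pvItem, hget, hcount]
      rw [pvMergeIdx, bounds_cons,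
        map_zip_cons_shift ((t.takeWhile (· == d)).length + 1) (pvBounds (t.dropWhile (· == d)))
          (bounds_head _) (pvItem (d :: t)) (pvItem (t.dropWhile (· == d))) hshift]
      rw [show ((pvBounds (t.dropWhile (· == d))).zip (pvBounds (t.dropWhile (· == d))).tail).map
            (pvItem (t.dropWhile (· == d))) = pvMergeIdx (t.dropWhile (· == d)) from rfl]
      rw [ih _ hrlen, pvCanon]
      congr 1
      have hc : ((((t.takeWhile (· == d)).length + 1 : Nat)) : Int) - ((0 : Nat) : Int)
          = 1 + (((t.takeWhile (· == d)).length : Int)) := by push_cast; ring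
      simp only [pvItem, hc]
      rfl


lemma alt_eq_mergeIdx (l : List (String × String)) :
    merge_dialogues_alt l = pvMergeIdx l := by
  unfold merge_dialogues_alt
  dsimp only
  have hstarts : (PySem.List.pyRange 0 (l.length : Int) 1).filter
      (fun i => i == 0 || !(PySem.List.pyGet? l i == PySem.List.pyGet? l (i - 1)))
      = (pvStarts l).map (fun k : Nat => (k : Int)) := by
    rw [show ((l.length : Int)) = ((l.length : Nat) : Int) from rfl]
    rw [PySem.List.pyRange_zero_natCast, List.filter_map]
    unfold pvStarts
    congr 1
    apply List.filter_congr
    intro i _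
    simp only [Function.comp]
    by_cases hi : i = 0
    · subst hi; simp [pvStartsPred]
    · have hcast : ((i : Int) - 1) = (((i - 1 : Nat)) : Int) := by omega
      rw [hcast, PySem.List.pyGet?_natCast, PySem.List.pyGet?_natCast]
      simp only [pvStartsPred]
      congr 1
      simp
  rw [hstarts]
  have hbounds : (pvStarts l).map (fun k : Nat => (k : Int)) ++ [(l.length : Int)]
      = (pvBounds l).map (fun k : Nat => (k : Int)) := by
    unfold pvBounds
    rw [List.map_append]
    rfl
  rw [hbounds]
  have ht : ((pvBounds l).map (fun k : Nat => (k : Int))).tail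
      = (pvBounds l).tail.map (fun k : Nat => (k : Int)) := by
    cases (pvBounds l) <;> rfl
  rw [ht, List.zip_map, List.map_map, pvMergeIdx]
  apply List.map_congr_left
  intro p _
  simp only [Function.comp, Prod.map]
  rw [PySem.List.pyGet?_natCast]
  simp only [pvItem, List.getD_eq_getElem?_getD]

-- proof-side: A's flush of a pending run
def pvFlush (c : String × String) (k : Int) : String × String :=
  if k > 1 then (c.1, c.2 ++ " +" ++ PySem.Int.toStr k) else c

-- proof-side: A's loop with a pending element, accumulator dropped
def pvRun : (String × String) → Int → List (String × String) → List (String × String)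
  | c, k, [] => [pvFlush c k]
  | c, k, d :: rest => if c = d then pvRun c (k + 1) rest else pvFlush c k :: pvRun d 1 rest

lemma mergeLoopA_some (l : List (String × String)) (merged : List (String × String))
    (c : String × String) (k : Int) :
    mergeLoopA l merged (some c) k = merged ++ pvRun c k l := by
  induction l generalizing merged c k with
  | nil => simp [mergeLoopA, pvRun, pvFlush]
  | cons d rest ih =>
    by_cases h : c = d
    · subst h
      simp [mergeLoopA, pvRun, ih]
    · have hb : ((some c == some d) = false) := by simp [h]
      simp [mergeLoopA, hb, pvRun, h, ih, pvFlush]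

lemma pvRun_eq (l : List (String × String)) (c : String × String) (k : Int) (hk : 1 ≤ k) :
    pvRun c k l = pvFlush c (k + ((l.takeWhile (· == c)).length : Int))
      :: pvCanon (l.dropWhile (· == c)) := by
  induction l generalizing c k with
  | nil => simp [pvRun, pvCanon]
  | cons d rest ih =>
    by_cases h : d = c
    · subst h
      have := ih d (k + 1) (by omega)
      simp only [pvRun, List.takeWhile_cons, List.dropWhile_cons, beq_self_eq_true, if_true,
        List.length_cons, this]
      congr 2
      push_cast
      ring
    · have hb : ((d == c) = false) := by simp [h]
      have hne : ¬ c = d := fun hcd => h hcd.symm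
      simp only [pvRun, if_neg hne, List.takeWhile_cons, List.dropWhile_cons, hb,
        Bool.false_eq_true, if_false, List.length_nil, Nat.cast_zero, add_zero]
      congr 1
      rw [pvCanon]
      have := ih d 1 (by omega)
      rw [this]
      unfold pvFlush
      by_cases hz : (rest.takeWhile (· == d)).length = 0
      · simp [hz]
      · have hgt : (1 : Int) + ((rest.takeWhile (· == d)).length : Int) > 1 := by
          have : 1 ≤ (rest.takeWhile (· == d)).length := Nat.one_le_iff_ne_zero.mpr hz
          omega
        have hne1 : ¬ ((1 + (((rest.takeWhile (· == d)).length : Int))) == 1) = true := by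
          simp only [beq_iff_eq]; intro hx; omega
        simp only [if_pos hgt, if_neg hne1]

lemma A_eq_canon (dialogues : List (String × String)) :
    merge_dialogues dialogues = pvCanon dialogues := by
  cases dialogues with
  | nil => simp [merge_dialogues, mergeLoopA, pvCanon]
  | cons d tail =>
    have hb : ((none == some d : Bool) = false) := rfl
    rw [merge_dialogues]
    simp only [mergeLoopA, hb, Bool.false_eq_true, if_false]
    rw [mergeLoopA_some, pvRun_eq _ _ _ (by omega), List.nil_append, pvCanon]
    unfold pvFlush
    by_cases hz : (tail.takeWhile (· == d)).length = 0
    · simp [hz]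
    · have hgt : (1 : Int) + ((tail.takeWhile (· == d)).length : Int) > 1 := by
        have : 1 ≤ (tail.takeWhile (· == d)).length := Nat.one_le_iff_ne_zero.mpr hz
        omega
      have hne1 : ¬ ((1 + (((tail.takeWhile (· == d)).length : Int))) == 1) = true := by
        simp only [beq_iff_eq]; intro hx; omega
      simp only [if_pos hgt, if_neg hne1]


-- ===== VERDICT (by name: the statement is the Claim_ definition above) =====
theorem merge_dialogues_spec : Claim_equal_merge_dialogues := by
  intro dialogues _
  unfold Spec_merge_dialogues
  rw [A_eq_canon, alt_eq_mergeIdx, mergeIdx_eq_canon_aux dialogues.length dialogues le_rfl]
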